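-- pv_equiv track=rewrite | github.com/kenmrtnz-dev/ocr-webapp | backend/app/row_detector.py | _active_runs
-- ===== SOURCE A (Python) =====
-- def _active_runs(active_mask):
--     runs = []
--     in_run = False
--     start = 0
--     for y, is_active in enumerate(active_mask):
--         if is_active and not in_run:
--             start = y
--             in_run = True
--         elif not is_active and in_run:
--             runs.append((start, y))
--             in_run = False
--     if in_run:
--         runs.append((start, len(active_mask)))
--     return runs
-- ===== SOURCE B (Python) =====
-- from itertools import groupby
--
-- def _active_runs(active_mask):
--     runs = []
--     pos = 0
--     for key, group in groupby(active_mask, key=bool):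
--         length = sum(1 for _ in group)
--         if key:
--             runs.append((pos, pos + length))
--         pos += length
--     return runs
-- ===== Notes on version B (the rewrite author's own statement) =====
-- stated objective: idiomatic
-- what changed: Replaced the explicit in_run/start state machine with post-loop fixup by an itertools.groupby pass over maximal equal-truthiness runs, keeping a running position counter.
import Mathlib
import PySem

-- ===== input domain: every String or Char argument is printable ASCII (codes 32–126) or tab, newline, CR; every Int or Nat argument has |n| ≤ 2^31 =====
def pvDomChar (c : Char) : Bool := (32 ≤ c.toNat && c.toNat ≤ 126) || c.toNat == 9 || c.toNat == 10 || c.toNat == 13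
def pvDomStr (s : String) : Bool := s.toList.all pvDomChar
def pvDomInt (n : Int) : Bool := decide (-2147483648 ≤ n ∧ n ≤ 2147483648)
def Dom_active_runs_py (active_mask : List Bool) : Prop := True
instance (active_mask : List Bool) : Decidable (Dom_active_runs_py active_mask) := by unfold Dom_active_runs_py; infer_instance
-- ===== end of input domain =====

-- B replaces A's in_run/start state machine (with post-loop fixup) by a groupby-style
-- pass over maximal equal runs with a running position counter (objective: idiomatic).

-- ===== PORT A =====
-- the for-loop over enumerate(active_mask), state (runs, in_run, start), y the index
def activeRunsLoopA (xs : List Bool) (y : Int) (runs : List (Int × Int))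
    (in_run : Bool) (start : Int) : List (Int × Int) × Bool × Int :=
  match xs with
  | [] => (runs, in_run, start)
  | b :: t =>
    if b && !in_run then activeRunsLoopA t (y + 1) runs true y
    else if !b && in_run then activeRunsLoopA t (y + 1) (runs ++ [(start, y)]) false start
    else activeRunsLoopA t (y + 1) runs in_run start

def active_runs_py (active_mask : List Bool) : List (Int × Int) :=
  let st := activeRunsLoopA active_mask 0 [] false 0
  if st.2.1 then st.1 ++ [(st.2.2, (active_mask.length : Int))] else st.1

-- ===== PORT B =====
-- groupby over maximal equal runs: take the run of the head element, emit it if truthy,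
-- advance pos by its length, recurse on the rest.
def activeRunsGroups (xs : List Bool) (pos : Int) : List (Int × Int) :=
  match xs with
  | [] => []
  | x :: t =>
    let grp := List.takeWhile (fun b => b == x) (x :: t)
    let len : Int := (grp.length : Int)
    let rest := List.dropWhile (fun b => b == x) (x :: t)
    if x then (pos, pos + len) :: activeRunsGroups rest (pos + len)
    else activeRunsGroups rest (pos + len)
termination_by xs.length
decreasing_by
  all_goals
    simp only [List.dropWhile_cons, beq_self_eq_true, if_true]
    have := List.length_dropWhile_le (fun b => b == x) t
    simp; omega

def active_runs_py_alt (active_mask : List Bool) : List (Int × Int) :=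
  activeRunsGroups active_mask 0

-- ===== PRECONDITION & SPEC =====
def Spec_active_runs_py (active_mask : List Bool) (out : List (Int × Int)) : Prop := out = active_runs_py_alt active_mask
instance (active_mask : List Bool) (out : List (Int × Int)) : Decidable (Spec_active_runs_py active_mask out) := by unfold Spec_active_runs_py; infer_instance

-- ===== CLAIM (what is proved, stated in full; the proofs are below) =====
def Claim_equal_active_runs_py : Prop := ∀ (active_mask : List Bool), Dom_active_runs_py active_mask → Spec_active_runs_py active_mask (active_runs_py active_mask)

-- ===== LEMMAS AND PROOFS =====

-- finish the A-side state (apply the post-loop fixup at total length L)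
def arFinish (st : List (Int × Int) × Bool × Int) (L : Int) : List (Int × Int) :=
  if st.2.1 then st.1 ++ [(st.2.2, L)] else st.1

theorem groups_nil (pos : Int) : activeRunsGroups [] pos = [] := by
  simp [activeRunsGroups]

theorem groups_cons (x : Bool) (t : List Bool) (pos : Int) :
    activeRunsGroups (x :: t) pos =
      (let len : Int := ((List.takeWhile (fun b => b == x) (x :: t)).length : Int)
       let rest := List.dropWhile (fun b => b == x) (x :: t)
       if x then (pos, pos + len) :: activeRunsGroups rest (pos + len)
       else activeRunsGroups rest (pos + len)) := by
  rw [activeRunsGroups]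

-- skipping one leading false advances pos by one
theorem groups_skip_false (t : List Bool) (pos : Int) :
    activeRunsGroups (false :: t) pos = activeRunsGroups t (pos + 1) := by
  rw [groups_cons]
  cases t with
  | nil => simp [groups_nil]
  | cons b t' =>
    cases b with
    | false =>
      rw [groups_cons]
      simp only [List.takeWhile_cons, List.dropWhile_cons]
      simp only [show ((false : Bool) == false) = true from rfl, if_true, Bool.false_eq_true,
        if_false]
      have : pos + ((((List.takeWhile (fun b => b == false) t').length : Nat) : Int) + 1 + 1)
          = pos + 1 + (((List.takeWhile (fun b => b == false) t').length : Nat) + 1 : Int) := by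
        ring
      simp only [List.length_cons]
      push_cast
      ring_nf
    | true =>
      simp only [List.takeWhile_cons, List.dropWhile_cons]
      norm_num

-- the main invariant: folding A's loop from position pos and finishing at pos + |xs| equals
-- runs ++ B's groups (when not in a run), resp. closes the open run first (when in a run)
theorem loop_invariant (xs : List Bool) :
    (∀ (pos : Int) (runs : List (Int × Int)) (start : Int),
        arFinish (activeRunsLoopA xs pos runs false start) (pos + (xs.length : Int))
          = runs ++ activeRunsGroups xs pos)
    ∧ (∀ (pos : Int) (runs : List (Int × Int)) (start : Int),
        arFinish (activeRunsLoopA xs pos runs true start) (pos + (xs.length : Int))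
          = runs ++ (start, pos + ((List.takeWhile (fun b => b == true) xs).length : Int))
              :: activeRunsGroups (List.dropWhile (fun b => b == true) xs)
                  (pos + ((List.takeWhile (fun b => b == true) xs).length : Int))) := by
  induction xs with
  | nil =>
    constructor
    · intro pos runs start
      simp [activeRunsLoopA, arFinish, groups_nil]
    · intro pos runs start
      simp [activeRunsLoopA, arFinish, groups_nil]
  | cons b t ih =>
    obtain ⟨ihF, ihT⟩ := ih
    cases b with
    | false =>
      constructor
      · intro pos runs start
        simp only [activeRunsLoopA, Bool.false_and, Bool.not_false, Bool.and_false,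
          Bool.false_eq_true, if_false]
        have h := ihF (pos + 1) runs start
        simp only [List.length_cons] at *
        have hL : pos + (((t.length : Nat) + 1 : Nat) : Int) = pos + 1 + (t.length : Int) := by
          push_cast; ring
        rw [hL, h, groups_skip_false]
      · intro pos runs start
        simp only [activeRunsLoopA, Bool.false_and, Bool.not_false, Bool.and_true,
          Bool.false_eq_true, if_false, if_true]
        have h := ihF (pos + 1) (runs ++ [(start, pos)]) start
        simp only [List.length_cons] at *
        have hL : pos + (((t.length : Nat) + 1 : Nat) : Int) = pos + 1 + (t.length : Int) := by
          push_cast; ring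
        rw [hL, h, List.append_assoc]
        simp only [List.takeWhile_cons, List.dropWhile_cons]
        simp only [show ((false : Bool) == true) = false from rfl]
        simp [groups_skip_false]
    | true =>
      constructor
      · intro pos runs start
        simp only [activeRunsLoopA, Bool.true_and, Bool.not_false, if_true]
        have h := ihT (pos + 1) runs pos
        simp only [List.length_cons] at *
        have hL : pos + (((t.length : Nat) + 1 : Nat) : Int) = pos + 1 + (t.length : Int) := by
          push_cast; ring
        rw [hL, h, groups_cons]
        simp only [List.takeWhile_cons, List.dropWhile_cons]
        simp only [show ((true : Bool) == true) = true from rfl, if_true, List.length_cons]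
        have hA : pos + 1 + ((List.takeWhile (fun b => b == true) t).length : Int)
            = pos + ((((List.takeWhile (fun b => b == true) t).length : Nat) + 1 : Nat) : Int) := by
          push_cast; ring
        rw [hA]
      · intro pos runs start
        simp only [activeRunsLoopA, Bool.not_true, Bool.and_false,
          Bool.false_and, Bool.false_eq_true, if_false]
        have h := ihT (pos + 1) runs start
        simp only [List.length_cons] at *
        have hL : pos + (((t.length : Nat) + 1 : Nat) : Int) = pos + 1 + (t.length : Int) := by
          push_cast; ring
        rw [hL, h]
        simp only [List.takeWhile_cons, List.dropWhile_cons]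
        simp only [show ((true : Bool) == true) = true from rfl, if_true, List.length_cons]
        have hA : pos + 1 + ((List.takeWhile (fun b => b == true) t).length : Int)
            = pos + ((((List.takeWhile (fun b => b == true) t).length : Nat) + 1 : Nat) : Int) := by
          push_cast; ring
        rw [hA]

-- ===== VERDICT (by name: the statement is the Claim_ definition above) =====
theorem active_runs_py_spec : Claim_equal_active_runs_py := by
  intro m _
  unfold Spec_active_runs_py active_runs_py active_runs_py_alt
  have h := (loop_invariant m).1 0 [] 0
  simp only [zero_add] at h
  simpa [arFinish] using h
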